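-- pv_equiv track=rewrite | github.com/lhl/tweetxvault | tweetxvault/query_ids/scraper.py | _chunk_keywords
-- ===== SOURCE A (Python) =====
-- from collections.abc import Iterable, Sequence
--
-- def _chunk_keywords(operations: Sequence[str]) -> set[str]:
--     keywords: set[str] = set()
--     for operation in operations:
--         if "Bookmark" in operation:
--             keywords.add("Bookmark")
--         if "Like" in operation:
--             keywords.add("Like")
--         if "Article" in operation:
--             keywords.add("Article")
--         keywords.add(operation)
--     return keywords
-- ===== SOURCE B (Python) =====
-- def _chunk_keywords(operations):
--     if not operations:
--         return set()
--     if len(operations) == 1: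
--         op = operations[0]
--         found = {t for t in ("Bookmark", "Like", "Article") if t in op}
--         return found | {op}
--     mid = len(operations) // 2
--     return _chunk_keywords(operations[:mid]) | _chunk_keywords(operations[mid:])
-- ===== Notes on version B (the rewrite author's own statement) =====
-- stated objective: alternative
-- what changed: Replaces A's single imperative pass with conditional set.add calls by a divide-and-conquer recursion: split the list in half, recurse on each half, and union the resulting sets, with a comprehension-built base case for one operation.
import Mathlib
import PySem

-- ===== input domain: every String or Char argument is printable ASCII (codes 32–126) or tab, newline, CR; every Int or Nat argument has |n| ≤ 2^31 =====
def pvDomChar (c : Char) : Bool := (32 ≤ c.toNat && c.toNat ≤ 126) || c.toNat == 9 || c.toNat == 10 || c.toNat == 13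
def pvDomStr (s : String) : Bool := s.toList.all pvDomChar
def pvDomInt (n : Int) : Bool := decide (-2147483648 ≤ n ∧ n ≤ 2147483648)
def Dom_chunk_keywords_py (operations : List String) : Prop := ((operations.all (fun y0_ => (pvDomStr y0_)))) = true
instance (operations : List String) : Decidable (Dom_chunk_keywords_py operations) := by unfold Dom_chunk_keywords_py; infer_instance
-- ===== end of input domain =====

-- B replaces A's single imperative pass (conditional set.add per operation) by a
-- divide-and-conquer recursion that unions the sets of the two halves (objective: alternative).
-- ===== PORT A =====
def chunk_keywords_py (operations : List String) : List String :=
  operations.foldl (fun keywords operation =>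
    let keywords := if PySem.Str.isIn "Bookmark" operation then PySem.Set.add keywords "Bookmark" else keywords
    let keywords := if PySem.Str.isIn "Like" operation then PySem.Set.add keywords "Like" else keywords
    let keywords := if PySem.Str.isIn "Article" operation then PySem.Set.add keywords "Article" else keywords
    PySem.Set.add keywords operation) PySem.Set.empty

-- ===== PORT B =====
-- 'len(operations) // 2' on the nonnegative length is exactly Nat division, written here as Nat '/'.
def chunk_keywords_py_alt (operations : List String) : List String :=
  match operations with
  | [] => PySem.Set.empty
  | [op] =>
      let found := PySem.Set.ofList (["Bookmark", "Like", "Article"].filter (fun t => PySem.Str.isIn t op))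
      PySem.Set.union found (PySem.Set.ofList [op])
  | op1 :: op2 :: rest =>
      let mid := (op1 :: op2 :: rest).length / 2
      PySem.Set.union
        (chunk_keywords_py_alt (PySem.List.slice (op1 :: op2 :: rest) none (some (mid : Int))))
        (chunk_keywords_py_alt (PySem.List.slice (op1 :: op2 :: rest) (some (mid : Int)) none))
termination_by operations.length
decreasing_by
  · rw [PySem.List.slice_to_natCast]; simp; omega
  · rw [PySem.List.slice_from_natCast]; simp; omega

-- ===== PRECONDITION & SPEC =====
def Spec_chunk_keywords_py (operations : List String) (out : List String) : Prop := out = chunk_keywords_py_alt operations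
instance (operations : List String) (out : List String) : Decidable (Spec_chunk_keywords_py operations out) := by unfold Spec_chunk_keywords_py; infer_instance

-- ===== CLAIM (what is proved, stated in full; the proofs are below) =====
def Claim_equal_chunk_keywords_py : Prop := ∀ (operations : List String), Dom_chunk_keywords_py operations → Spec_chunk_keywords_py operations (chunk_keywords_py operations)

-- ===== LEMMAS AND PROOFS =====

-- the tagged chunk one operation contributes, in A's insertion order
def pvChunk (op : String) : List String :=
  (["Bookmark", "Like", "Article"].filter (fun t => PySem.Str.isIn t op)) ++ [op]

-- set(xs ++ ys) = set(xs) | set(ys): union ignores duplicates inside its second argument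
theorem ofList_append_union (xs ys : List String) :
    PySem.Set.ofList (xs ++ ys) = PySem.Set.union (PySem.Set.ofList xs) (PySem.Set.ofList ys) := by
  show PySem.Set.ofList (xs ++ ys) = PySem.Set.update (PySem.Set.ofList xs) (PySem.Set.ofList ys)
  rw [PySem.Set.ofList_append, PySem.Set.update_eq_append_filter, PySem.Set.update_eq_append_filter,
    PySem.Set.ofList_ofList]

-- A's loop body on one operation equals folding Set.add over that operation's tagged chunk.
theorem chunk_keywords_step (kw : List String) (op : String) :
    (let kw := if PySem.Str.isIn "Bookmark" op then PySem.Set.add kw "Bookmark" else kw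
     let kw := if PySem.Str.isIn "Like" op then PySem.Set.add kw "Like" else kw
     let kw := if PySem.Str.isIn "Article" op then PySem.Set.add kw "Article" else kw
     PySem.Set.add kw op)
    = (pvChunk op).foldl PySem.Set.add kw := by
  simp only [pvChunk, List.filter_cons, List.filter_nil]
  split_ifs <;> simp [List.foldl]

-- A's whole fold equals set() of the flattened tagged stream.
theorem chunk_keywords_fold (ops : List String) (kw : List String) :
    ops.foldl (fun keywords operation =>
      let keywords := if PySem.Str.isIn "Bookmark" operation then PySem.Set.add keywords "Bookmark" else keywords
      let keywords := if PySem.Str.isIn "Like" operation then PySem.Set.add keywords "Like" else keywords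
      let keywords := if PySem.Str.isIn "Article" operation then PySem.Set.add keywords "Article" else keywords
      PySem.Set.add keywords operation) kw
    = (ops.flatMap pvChunk).foldl PySem.Set.add kw := by
  induction ops generalizing kw with
  | nil => rfl
  | cons op rest ih =>
      simp only [List.foldl, List.flatMap_cons, List.foldl_append]
      rw [ih, chunk_keywords_step]

-- B's divide-and-conquer also computes set() of the flattened tagged stream.
theorem chunk_keywords_alt_eq (ops : List String) :
    chunk_keywords_py_alt ops = PySem.Set.ofList (ops.flatMap pvChunk) := by
  induction ops using chunk_keywords_py_alt.induct with
  | case1 => rw [chunk_keywords_py_alt]; rfl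
  | case2 op =>
      rw [chunk_keywords_py_alt]
      rw [show List.flatMap pvChunk [op] = pvChunk op by simp]
      rw [pvChunk, ofList_append_union]
  | case3 op1 op2 rest mid ih1 ih2 =>
      rw [chunk_keywords_py_alt]
      simp only at ih1 ih2 ⊢
      rw [ih1, ih2, PySem.List.slice_to_natCast, PySem.List.slice_from_natCast,
        ← ofList_append_union, ← List.flatMap_append, List.take_append_drop]

-- ===== VERDICT (by name: the statement is the Claim_ definition above) =====
theorem chunk_keywords_py_spec : Claim_equal_chunk_keywords_py := by
  intro operations _
  unfold Spec_chunk_keywords_py chunk_keywords_py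
  rw [chunk_keywords_fold, chunk_keywords_alt_eq, PySem.Set.ofList_eq_foldl]
  rfl
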